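-- pv_equiv track=rewrite | github.com/luizademelo/competitive-programming | ProjectEuler/test.py | solve
-- ===== SOURCE A (Python) =====
-- import math
--
-- def is_prime(n):
--     if n < 2:
--         return False
--     # se nao for encontrado nenhum divisor menor que a raiz do numero,
--     # entao não há nenhum outro divisor alem de 1 e ele mesmo
--     for i in range(2, int(math.sqrt(n)) + 1):
--         if n % i == 0:
--             return False
--     return True
--
-- def invert_mod(n, p):
--     for i in range(1, p):
--         if (n * i) % p == 1:
--             return i
--     return None
--
-- def solve(a, b, k):
--     total = 0
--     for p in range(a, a + b):
--         if is_prime(p):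
--             inverse = invert_mod(k - 1, p)
--             if inverse is not None:
--                 total += inverse
--     return total
-- ===== SOURCE B (Python) =====
-- import math
--
-- def _is_prime_alt(p):
--     if p < 2:
--         return False
--     if p < 4:
--         return True
--     if p % 2 == 0:
--         return False
--     d = 3
--     r = math.isqrt(p)
--     while d <= r:
--         if p % d == 0:
--             return False
--         d += 2
--     return True
--
-- def solve(a, b, k):
--     n = k - 1
--     total = 0
--     for p in range(a, a + b):
--         if _is_prime_alt(p) and n % p != 0:
--             total += pow(n, p - 2, p)
--     return total
-- ===== Notes on version B (the rewrite author's own statement) =====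
-- stated objective: faster
-- what changed: B computes each modular inverse by Fermat's little theorem with builtin pow(k-1, p-2, p) instead of A's linear scan over all residues, and halves the trial division by testing only odd divisors after 2.
import Mathlib
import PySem

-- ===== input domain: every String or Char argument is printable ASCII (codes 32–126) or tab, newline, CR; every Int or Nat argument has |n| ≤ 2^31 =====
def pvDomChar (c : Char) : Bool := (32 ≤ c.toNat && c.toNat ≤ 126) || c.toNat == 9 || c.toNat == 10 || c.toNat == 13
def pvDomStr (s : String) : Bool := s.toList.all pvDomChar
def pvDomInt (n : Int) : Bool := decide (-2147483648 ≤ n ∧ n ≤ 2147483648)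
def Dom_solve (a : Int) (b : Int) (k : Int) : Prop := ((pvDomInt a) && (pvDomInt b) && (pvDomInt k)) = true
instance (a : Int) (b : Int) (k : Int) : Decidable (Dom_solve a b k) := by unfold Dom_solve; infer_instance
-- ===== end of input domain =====

-- B replaces A's O(p) brute-force search for the modular inverse by Fermat's little theorem
-- (pow(k-1, p-2, p)) and halves the trial division; objective: faster.

-- ===== PORT A =====
-- int(math.sqrt(n)) is ported as Nat.sqrt: exact for 0 ≤ n ≤ 2^32 (the double sqrt rounds faithfully
-- there, and Dom bounds the loop variable by 2^32).  The early-return loop over range(2, …) is the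
-- short-circuit List.all of the same predicate over the same range.
def isPrimeA (n : Int) : Bool :=
  if n < 2 then false
  else (PySem.List.pyRange 2 ((Nat.sqrt n.toNat : Int) + 1) 1).all
        (fun i => !(PySem.Int.mod n i == 0))

-- first i in range(1, p) with (n*i) % p == 1, else None
def invertMod (n p : Int) : Option Int :=
  (PySem.List.pyRange 1 p 1).find? (fun i => PySem.Int.mod (n * i) p == 1)

def solve (a : Int) (b : Int) (k : Int) : Int :=
  (PySem.List.pyRange a (a + b) 1).foldl
    (fun total p =>
      if isPrimeA p then
        match invertMod (k - 1) p with
        | some inv => total + inv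
        | none     => total
      else total) 0

-- ===== PORT B =====
-- math.isqrt(p); B only calls it with p ≥ 5
def isqrtI (p : Int) : Int := (Nat.sqrt p.toNat : Int)

-- the while-loop of _is_prime_alt: odd trial divisors d, d+2, … up to r
def oddTrial (p r d : Int) : Bool :=
  if d ≤ r then
    (if PySem.Int.mod p d == 0 then false else oddTrial p r (d + 2))
  else true
termination_by (r + 1 - d).toNat
decreasing_by omega

def isPrimeB (p : Int) : Bool :=
  if p < 2 then false
  else if p < 4 then true
  else if PySem.Int.mod p 2 == 0 then false
  else oddTrial p (isqrtI p) 3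

-- pow(n, p-2, p) is the library primitive PySem.Int.powMod (the exponent p-2 is ≥ 0 whenever reached)
def solve_alt (a : Int) (b : Int) (k : Int) : Int :=
  (PySem.List.pyRange a (a + b) 1).foldl
    (fun total p =>
      if isPrimeB p && !(PySem.Int.mod (k - 1) p == 0)
      then total + PySem.Int.powMod (k - 1) (p - 2).toNat p
      else total) 0

-- ===== PRECONDITION & SPEC =====
def Spec_solve (a : Int) (b : Int) (k : Int) (out : Int) : Prop := out = solve_alt a b k
instance (a : Int) (b : Int) (k : Int) (out : Int) : Decidable (Spec_solve a b k out) := by unfold Spec_solve; infer_instance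

-- ===== CLAIM (what is proved, stated in full; the proofs are below) =====
def Claim_equal_solve : Prop := ∀ (a : Int) (b : Int) (k : Int), Dom_solve a b k → Spec_solve a b k (solve a b k)

-- ===== LEMMAS AND PROOFS =====

-- find? on a list in which v is a member and the only element satisfying q
theorem find?_eq_some_of_unique {α : Type} (l : List α) (q : α → Bool) (v : α)
    (hv : v ∈ l) (hq : ∀ x ∈ l, q x = true ↔ x = v) : l.find? q = some v := by
  induction l with
  | nil => cases hv
  | cons x t ih =>
    by_cases hx : q x = true
    · have := (hq x (List.mem_cons_self)).1 hx
      subst this; simp [List.find?, hx]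
    · have hxv : x ≠ v := fun h => hx ((hq x List.mem_cons_self).2 h)
      have hv' : v ∈ t := by
        rcases List.mem_cons.1 hv with h | h
        · exact absurd h.symm hxv
        · exact h
      simp only [List.find?, Bool.not_eq_true] at *
      simp [hx]
      exact ih hv' (fun x hx => hq x (List.mem_cons_of_mem _ hx))

theorem isPrimeA_iff (p : Int) : isPrimeA p = true ↔ 2 ≤ p ∧ p.toNat.Prime := by
  unfold isPrimeA
  by_cases h2 : p < 2
  · simp only [if_pos h2, Bool.false_eq_true, false_iff]
    rintro ⟨h, -⟩; omega
  · replace h2 : 2 ≤ p := by omega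
    have hpN : p = (p.toNat : Int) := (Int.toNat_of_nonneg (by omega)).symm
    rw [if_neg (by omega)]
    simp only [List.all_eq_true, PySem.List.mem_pyRange_one, Bool.not_eq_eq_eq_not,
      Bool.not_true, beq_eq_false_iff_ne, ne_eq]
    constructor
    · intro h
      refine ⟨h2, ?_⟩
      rw [Nat.prime_def_le_sqrt]
      refine ⟨by omega, ?_⟩
      intro m hm2 hms hdvd
      have hmem := h (m : Int) ⟨by exact_mod_cast hm2, by omega⟩
      apply hmem
      rw [PySem.Int.mod_eq_zero_iff_dvd]
      rw [hpN]
      exact_mod_cast hdvd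
    · rintro ⟨-, hp⟩ i ⟨hi2, his⟩ hmod
      rw [PySem.Int.mod_eq_zero_iff_dvd] at hmod
      rw [Nat.prime_def_le_sqrt] at hp
      refine hp.2 i.toNat (by omega) (by omega) ?_
      have : ((i.toNat : Int)) ∣ ((p.toNat : Int)) := by
        rw [Int.toNat_of_nonneg (by omega), ← hpN]; exact hmod
      exact_mod_cast this

theorem oddTrial_iff (p r d : Int) :
    oddTrial p r d = true ↔ ∀ e : Int, d ≤ e → e ≤ r → 2 ∣ (e - d) → ¬ e ∣ p := by
  fun_induction oddTrial p r d with
  | case1 d hle hmod =>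
    simp only [Bool.false_eq_true, false_iff]
    intro h
    exact h d le_rfl hle ⟨0, by ring⟩ ((PySem.Int.mod_eq_zero_iff_dvd p d).1 (by simpa using hmod))
  | case2 d hle hmod ih =>
    rw [ih]
    constructor
    · intro h e hde her h2
      rcases eq_or_lt_of_le hde with heq | hlt
      · subst heq
        intro hdvd
        have h0 : PySem.Int.mod p d = 0 := (PySem.Int.mod_eq_zero_iff_dvd p d).2 hdvd
        simp [h0] at hmod
      · refine h e (by omega) her (by omega)
    · intro h e hde her h2
      exact h e (by omega) her (by omega)
  | case3 d hgt =>
    simp only [true_iff]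
    intro e hde her h2
    omega

theorem isPrimeB_iff (p : Int) : isPrimeB p = true ↔ 2 ≤ p ∧ p.toNat.Prime := by
  unfold isPrimeB
  by_cases h2 : p < 2
  · simp only [if_pos h2, Bool.false_eq_true, false_iff]; rintro ⟨h, -⟩; omega
  · rw [if_neg h2]
    by_cases h4 : p < 4
    · rw [if_pos h4]
      simp only [true_iff]
      interval_cases p
      · exact ⟨by omega, by decide⟩
      · exact ⟨by omega, by decide⟩
    · rw [if_neg h4]
      by_cases heven : PySem.Int.mod p 2 == 0
      · rw [if_pos heven]
        simp only [Bool.false_eq_true, false_iff]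
        rintro ⟨-, hp⟩
        have hdvd : (2:Int) ∣ p := (PySem.Int.mod_eq_zero_iff_dvd p 2).1 (by simpa using heven)
        have hdvdN : 2 ∣ p.toNat := by
          have : ((2:Nat):Int) ∣ ((p.toNat:Int)) := by
            rw [Int.toNat_of_nonneg (by omega)]; exact_mod_cast hdvd
          exact_mod_cast this
        have := (Nat.Prime.eq_one_or_self_of_dvd hp 2 hdvdN)
        omega
      · rw [if_neg heven]
        have hodd : ¬ (2:Int) ∣ p := fun h => by
          have h0 : PySem.Int.mod p 2 = 0 := (PySem.Int.mod_eq_zero_iff_dvd p 2).2 h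
          simp at heven
          omega
        rw [oddTrial_iff]
        unfold isqrtI
        constructor
        · intro h
          refine ⟨by omega, ?_⟩
          rw [Nat.prime_def_le_sqrt]
          refine ⟨by omega, ?_⟩
          intro m hm2 hms hdvd
          have hdvdI : (m:Int) ∣ p := by
            rw [show p = ((p.toNat:Int)) from (Int.toNat_of_nonneg (by omega)).symm]
            exact_mod_cast hdvd
          by_cases hme : 2 ∣ m
          · exact hodd (dvd_trans (by exact_mod_cast hme) hdvdI)
          · have hm3 : 3 ≤ (m:Int) := by omega
            exact h (m:Int) hm3 (by omega) (by omega) hdvdI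
        · rintro ⟨-, hp⟩ e he3 her h2e hdvd
          rw [Nat.prime_def_le_sqrt] at hp
          refine hp.2 e.toNat (by omega) (by omega) ?_
          have : ((e.toNat : Int)) ∣ ((p.toNat : Int)) := by
            rw [Int.toNat_of_nonneg (by omega), Int.toNat_of_nonneg (by omega)]
            exact hdvd
          exact_mod_cast this

theorem invertMod_eq_none_of_dvd (n p : Int) (h : p ∣ n) :
    invertMod n p = none := by
  unfold invertMod
  rw [List.find?_eq_none]
  intro i hi
  have h0 : PySem.Int.mod (n * i) p = 0 :=
    (PySem.Int.mod_eq_zero_iff_dvd _ _).2 (Dvd.dvd.mul_right h i)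
  simp [h0]

theorem invertMod_prime (n p : Int) (hp2 : 2 ≤ p) (hpp : p.toNat.Prime) (h : ¬ p ∣ n) :
    invertMod n p = some (PySem.Int.powMod n (p - 2).toNat p) := by
  haveI : Fact (Nat.Prime p.toNat) := ⟨hpp⟩
  have hpN : ((p.toNat : Int)) = p := Int.toNat_of_nonneg (by omega)
  set e := (p - 2).toNat with he
  have hv : PySem.Int.powMod n e p = (n ^ e) % p := by
    unfold PySem.Int.powMod
    exact PySem.Int.mod_eq_emod_of_pos (by omega)
  set v := PySem.Int.powMod n e p with hvdef
  -- n is a unit mod p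
  have hn0 : (n : ZMod p.toNat) ≠ 0 := by
    intro h0
    rw [ZMod.intCast_zmod_eq_zero_iff_dvd, hpN] at h0
    exact h h0
  -- Fermat: n^(e+1) ≡ 1 mod p
  have hfer : (n ^ (e + 1)) % p = 1 % p := by
    have h1 : ((n : ZMod p.toNat)) ^ (p.toNat - 1) = 1 := ZMod.pow_card_sub_one_eq_one hn0
    have he1 : e + 1 = p.toNat - 1 := by omega
    have : ((n ^ (e+1) : Int) : ZMod p.toNat) = (((1:Int)) : ZMod p.toNat) := by
      push_cast
      rw [he1, h1]
    have hmq := (ZMod.intCast_eq_intCast_iff _ _ _).1 this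
    rw [Int.ModEq] at hmq
    rwa [hpN] at hmq
  have h1p : (1:Int) % p = 1 := Int.emod_eq_of_lt (by omega) (by omega)
  -- the key property of v
  have key : (n * v) % p = 1 := by
    rw [hv, Int.mul_emod, Int.emod_emod_of_dvd _ dvd_rfl, ← Int.mul_emod, ← pow_succ']
    rw [hfer, h1p]
  have hv0 : 0 ≤ v := by rw [hv]; exact Int.emod_nonneg _ (by omega)
  have hvlt : v < p := by rw [hv]; exact Int.emod_lt_of_pos _ (by omega)
  have hv1 : 1 ≤ v := by
    rcases eq_or_lt_of_le hv0 with h0 | h0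
    · exfalso
      rw [← h0] at key
      simp at key
    · omega
  unfold invertMod
  apply find?_eq_some_of_unique
  · exact PySem.List.mem_pyRange_one.2 ⟨hv1, hvlt⟩
  · intro i hi
    have hib := PySem.List.mem_pyRange_one.1 hi
    have hmod : PySem.Int.mod (n * i) p = (n * i) % p := PySem.Int.mod_eq_emod_of_pos (by omega)
    simp only [hmod, beq_iff_eq]
    constructor
    · intro hq
      have hmq : ((n * i : Int) : ZMod p.toNat) = ((n * v : Int) : ZMod p.toNat) := by
        rw [ZMod.intCast_eq_intCast_iff, Int.ModEq, hpN, hq, key]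
      push_cast at hmq
      have := mul_left_cancel₀ hn0 hmq
      have hmq2 := (ZMod.intCast_eq_intCast_iff i v p.toNat).1 (by exact_mod_cast this)
      rw [Int.ModEq, hpN] at hmq2
      rwa [Int.emod_eq_of_lt (by omega) hib.2, Int.emod_eq_of_lt hv0 hvlt] at hmq2
    · rintro rfl
      exact key

-- the two loop bodies agree at every p
theorem step_eq (k p total : Int) :
    (if isPrimeA p then
        match invertMod (k - 1) p with
        | some inv => total + inv
        | none     => total
      else total)
    = (if isPrimeB p && !(PySem.Int.mod (k - 1) p == 0)
       then total + PySem.Int.powMod (k - 1) (p - 2).toNat p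
       else total) := by
  by_cases hA : isPrimeA p = true
  · obtain ⟨hp2, hpp⟩ := (isPrimeA_iff p).1 hA
    have hB : isPrimeB p = true := (isPrimeB_iff p).2 ⟨hp2, hpp⟩
    rw [if_pos hA]
    by_cases hdvd : p ∣ (k - 1)
    · have hm : PySem.Int.mod (k - 1) p = 0 := (PySem.Int.mod_eq_zero_iff_dvd _ _).2 hdvd
      rw [invertMod_eq_none_of_dvd _ _ hdvd]
      simp [hB, hm]
    · have hm : PySem.Int.mod (k - 1) p ≠ 0 := fun h =>
        hdvd ((PySem.Int.mod_eq_zero_iff_dvd _ _).1 h)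
      rw [invertMod_prime _ _ hp2 hpp hdvd]
      simp [hB, hm]
  · have hB : ¬ isPrimeB p = true := fun h => hA ((isPrimeA_iff p).2 ((isPrimeB_iff p).1 h))
    simp [hA, hB]

-- ===== VERDICT (by name: the statement is the Claim_ definition above) =====
theorem solve_spec : Claim_equal_solve := by
  intro a b k _
  unfold Spec_solve solve solve_alt
  have hf : (fun (total p : Int) =>
      if isPrimeA p then
        match invertMod (k - 1) p with
        | some inv => total + inv
        | none     => total
      else total)
    = (fun (total p : Int) =>
      if isPrimeB p && !(PySem.Int.mod (k - 1) p == 0)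
      then total + PySem.Int.powMod (k - 1) (p - 2).toNat p
      else total) := by
    funext total p; exact step_eq k p total
  rw [hf]
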